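-- pv_equiv track=rewrite | github.com/DanielTLouis/HackerRank | Algorithms/Prepare_Algorithms_Search_CutTheTree.py | dfs
-- ===== SOURCE A (Python) =====
-- def dfs(conn , node, sums, data, parent):
--     if sums[node]!=0:
--         return sums[node]
--     nb = conn[node]
--     if len(nb)==1 and node!=0:
--         sums[node] = data[node]
--         return data[node]
--     ans = 0
--     for n1 in nb:
--         if n1!=parent:
--             ans += dfs(conn, n1, sums, data, node)
--     ans += data[node]
--     sums[node] = ans
--     return ans
-- ===== SOURCE B (Python) =====
-- def dfs(conn, node, sums, data, parent):
--     # Defunctionalized CPS machine: an explicit frame stack and a value register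
--     # replace A's recursion; same sums mutations in the same order.
--     if sums[node] != 0:
--         return sums[node]
--     frames = []          # (owner, pending children, partial sum)
--     cur, par = node, parent
--     ret = None
--     calling = True
--     while True:
--         if calling:
--             if sums[cur] != 0:
--                 ret, calling = sums[cur], False
--             else:
--                 nb = conn[cur]
--                 if len(nb) == 1 and cur != 0:
--                     sums[cur] = data[cur]
--                     ret, calling = data[cur], False
--                 else:
--                     rest = [x for x in nb if x != par]
--                     if not rest:
--                         ret = data[cur]
--                         sums[cur] = ret
--                         calling = False
--                     else:
--                         frames.append((cur, rest[1:], 0))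
--                         cur, par = rest[0], cur
--         else:
--             if not frames:
--                 return ret
--             c, pending, acc = frames.pop()
--             acc += ret
--             if pending:
--                 frames.append((c, pending[1:], acc))
--                 cur, par, calling = pending[0], c, True
--             else:
--                 ret = acc + data[c]
--                 sums[c] = ret
-- ===== Notes on version B (the rewrite author's own statement) =====
-- stated objective: alternative
-- what changed: Replaces A's recursive memoized DFS by an iterative defunctionalized machine: an explicit stack of (owner, pending-children, partial-sum) frames plus a value register, performing the same memo reads and sums writes in the same order without recursion.
-- outside the precondition, e.g. on dfs({0: [1, 2], 1: [0, 2], 2: [0, 1]}, 0, [0, 5, 0], [1, 1, 1], -1): A returns 12, B returns 12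
import Mathlib
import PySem

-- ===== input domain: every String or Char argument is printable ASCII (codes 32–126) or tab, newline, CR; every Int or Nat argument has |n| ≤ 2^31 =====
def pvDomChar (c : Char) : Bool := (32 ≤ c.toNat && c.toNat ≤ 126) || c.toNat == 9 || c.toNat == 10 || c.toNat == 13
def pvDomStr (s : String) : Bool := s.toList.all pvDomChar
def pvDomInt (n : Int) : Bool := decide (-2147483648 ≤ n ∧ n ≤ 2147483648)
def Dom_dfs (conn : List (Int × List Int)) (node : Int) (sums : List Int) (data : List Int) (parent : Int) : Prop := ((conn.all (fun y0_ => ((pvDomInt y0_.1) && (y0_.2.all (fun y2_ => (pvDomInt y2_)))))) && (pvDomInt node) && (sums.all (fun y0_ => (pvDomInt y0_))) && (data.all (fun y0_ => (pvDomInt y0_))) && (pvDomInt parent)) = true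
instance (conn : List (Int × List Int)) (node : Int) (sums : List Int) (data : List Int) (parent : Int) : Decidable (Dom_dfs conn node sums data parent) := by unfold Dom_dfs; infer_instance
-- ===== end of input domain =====

-- B replaces A's recursive DFS by an iterative defunctionalized machine (explicit frame stack +
-- value register), an alternative decomposition of the same cost; both Pythons mutate the shared
-- sums memo identically — the theorems here are about the RETURN value.

-- ===== PORT A =====
-- literal port of A's recursion; fuel only makes the recursion total (A can recurse without
-- bound on cyclic adjacency); inside Pre_dfs the chosen fuel sums.length+1 is proved sufficient
mutual
def dfsAO (conn : List (Int × List Int)) (data : List Int) : Nat → Int → List Int → Int → Option (Int × List Int)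
  | 0, _, _, _ => none
  | f+1, node, sums, parent =>
    match PySem.List.pyGet? sums node with
    | none => none
    | some sv =>
      if sv ≠ 0 then some (sv, sums)
      else
        match (PySem.Dict.mk conn).get? node with
        | none => none
        | some nb =>
          if nb.length = 1 ∧ node ≠ 0 then
            match PySem.List.pyGet? data node with
            | none => none
            | some d => some (d, PySem.List.pySetD sums node d)
          else
            match dfsAOFold conn data f node parent nb 0 sums with
            | none => none
            | some (a, s) =>
              match PySem.List.pyGet? data node with
              | none => none
              | some d => some (a + d, PySem.List.pySetD s node (a + d))
termination_by f _ _ _ => (f, 0)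
decreasing_by all_goals exact Prod.Lex.left _ _ (by omega)

-- the 'for n1 in nb' loop of A, state (ans, sums)
def dfsAOFold (conn : List (Int × List Int)) (data : List Int) : Nat → Int → Int → List Int → Int → List Int → Option (Int × List Int)
  | _, _, _, [], a, s => some (a, s)
  | f, node, parent, n1 :: rest, a, s =>
    if n1 ≠ parent then
      match dfsAO conn data f n1 s node with
      | none => none
      | some (r, s') => dfsAOFold conn data f node parent rest (a + r) s'
    else dfsAOFold conn data f node parent rest a s
termination_by f _ _ l _ _ => (f, l.length + 1)
decreasing_by all_goals (first | exact Prod.Lex.left _ _ (by omega) | exact Prod.Lex.right _ (by simp only [List.length_cons]; omega))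
end

def dfs (conn : List (Int × List Int)) (node : Int) (sums : List Int) (data : List Int) (parent : Int) : Int :=
  match dfsAO conn data (sums.length + 1) node sums parent with
  | some (r, _) => r
  | none => 0

-- ===== PORT B =====
-- literal port of Source B's machine loop: state = value register (Sum.inr ret) or a pending call
-- (Sum.inl (cur, par)); frames hold (owner, pending children, partial sum); fuel = totality guard
def dfsBrun (conn : List (Int × List Int)) (data : List Int) : Nat → ((Int × Int) ⊕ Int) → List (Int × List Int × Int) → List Int → Option Int
  | 0, Sum.inl _, _, _ => none
  | f+1, Sum.inl (cur, par), fr, s =>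
    match PySem.List.pyGet? s cur with
    | none => none
    | some sv =>
      if sv ≠ 0 then dfsBrun conn data f (Sum.inr sv) fr s
      else
        match (PySem.Dict.mk conn).get? cur with
        | none => none
        | some nb =>
          if nb.length = 1 ∧ cur ≠ 0 then
            match PySem.List.pyGet? data cur with
            | none => none
            | some d => dfsBrun conn data f (Sum.inr d) fr (PySem.List.pySetD s cur d)
          else
            match nb.filter (fun x => x != par) with
            | [] =>
              match PySem.List.pyGet? data cur with
              | none => none
              | some d => dfsBrun conn data f (Sum.inr d) fr (PySem.List.pySetD s cur d)
            | c :: cs => dfsBrun conn data f (Sum.inl (c, cur)) ((cur, cs, 0) :: fr) s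
  | _, Sum.inr r, [], _ => some r
  | f, Sum.inr r, (c, pending, acc) :: fr, s =>
    match pending with
    | [] =>
      match PySem.List.pyGet? data c with
      | none => none
      | some d => dfsBrun conn data f (Sum.inr (acc + r + d)) fr (PySem.List.pySetD s c (acc + r + d))
    | c2 :: cs =>
      match f with
      | 0 => none
      | f+1 => dfsBrun conn data f (Sum.inl (c2, c)) ((c, cs, acc + r) :: fr) s
termination_by f _ fr _ => (f, fr.length)
decreasing_by all_goals (first | exact Prod.Lex.left _ _ (by omega) | exact Prod.Lex.right _ (by simp only [List.length_cons]; omega))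

def sizeConn (conn : List (Int × List Int)) : Nat := (conn.map (fun e => e.2.length)).sum

def dfs_alt (conn : List (Int × List Int)) (node : Int) (sums : List Int) (data : List Int) (parent : Int) : Int :=
  let sv := (PySem.List.pyGet? sums node).getD 0
  if sv ≠ 0 then sv
  else (dfsBrun conn data ((sizeConn conn + 2) ^ (sums.length + 2)) (Sum.inl (node, parent)) [] sums).getD 0

-- ===== PRECONDITION & SPEC =====
-- bw k par cur = true: every non-backtracking walk of the neighbor graph starting at cur (not
-- stepping straight back to the vertex it just came from) ends within k further steps — a
-- closed-form shape condition on conn only (it never looks at sums/data or runs either port)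
def bw (conn : List (Int × List Int)) : Nat → Int → Int → Bool
  | 0, par, cur => (((PySem.Dict.mk conn).get? cur).getD []).all (fun v => v == par)
  | k+1, par, cur => (((PySem.Dict.mk conn).get? cur).getD []).all (fun v => v == par || bw conn k cur v)

-- canonical well-formed instance: vertices 0..n-1 (n = len sums = len data), every vertex a key
-- of conn with in-range neighbors, and no non-backtracking walk from (parent, node) longer than n
def structOK (conn : List (Int × List Int)) (node : Int) (sums : List Int) (data : List Int) (parent : Int) : Bool :=
  decide (0 ≤ node) && decide (node < (sums.length : Int)) && (data.length == sums.length) &&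
  (List.range sums.length).all (fun u =>
    match (PySem.Dict.mk conn).get? (u : Int) with
    | none => false
    | some nb => nb.all (fun v => decide (0 ≤ v) && decide (v < (sums.length : Int)))) &&
  bw conn sums.length parent node

-- Pre_dfs excludes (i) inputs on which A raises (index/key lookup fails) and (ii) — stated
-- narrowing — inputs whose neighbor graph admits a non-backtracking walk longer than n, where
-- A's recursion depth has no input-visible bound (on such inputs A usually diverges with
-- RecursionError, though it can still return when the memo happens to cut the cycle; see
-- claim.json cites — B returns the same value there, but termination is not derivable from the
-- input shape, so it is not claimed). Calls that return without recursing (memo hit, leaf,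
-- all neighbors equal to parent) are admitted for any conn shape.
def preB_dfs (conn : List (Int × List Int)) (node : Int) (sums : List Int) (data : List Int) (parent : Int) : Bool :=
  match PySem.List.pyGet? sums node with
  | none => false
  | some sv =>
    if sv != 0 then true
    else
      (match (PySem.Dict.mk conn).get? node, PySem.List.pyGet? data node with
       | some nb, some _ => (nb.length == 1 && node != 0) || nb.all (fun v => v == parent)
       | _, _ => false)
      || structOK conn node sums data parent

def Pre_dfs (conn : List (Int × List Int)) (node : Int) (sums : List Int) (data : List Int) (parent : Int) : Prop :=
  preB_dfs conn node sums data parent = true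
instance (conn : List (Int × List Int)) (node : Int) (sums : List Int) (data : List Int) (parent : Int) : Decidable (Pre_dfs conn node sums data parent) := by unfold Pre_dfs; infer_instance

def pvWitness_dfs : (List (Int × List Int)) × Int × List Int × List Int × Int :=
  ([(0, [1]), (1, [0, 2]), (2, [1])], 0, [0, 0, 0], [1, 2, 3], -1)

def Spec_dfs (conn : List (Int × List Int)) (node : Int) (sums : List Int) (data : List Int) (parent : Int) (out : Int) : Prop := out = dfs_alt conn node sums data parent
instance (conn : List (Int × List Int)) (node : Int) (sums : List Int) (data : List Int) (parent : Int) (out : Int) : Decidable (Spec_dfs conn node sums data parent out) := by unfold Spec_dfs; infer_instance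

-- ===== CLAIM =====
def Claim_equal_dfs : Prop := ∀ (conn : List (Int × List Int)) (node : Int) (sums : List Int) (data : List Int) (parent : Int), Dom_dfs conn node sums data parent → Pre_dfs conn node sums data parent → Spec_dfs conn node sums data parent (dfs conn node sums data parent)

-- ===== LEMMAS AND PROOFS =====

theorem step_memo (conn : List (Int × List Int)) (data : List Int) (g : Nat) (cur par sv : Int)
    (fr : List (Int × List Int × Int)) (s : List Int)
    (hget : PySem.List.pyGet? s cur = some sv) (hsv : sv ≠ 0) :
    dfsBrun conn data (g+1) (Sum.inl (cur, par)) fr s = dfsBrun conn data g (Sum.inr sv) fr s := by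
  simp [dfsBrun, hget, hsv]
theorem step_leaf (conn : List (Int × List Int)) (data : List Int) (g : Nat) (cur par : Int)
    (nb : List Int) (d : Int) (fr : List (Int × List Int × Int)) (s : List Int)
    (hget : PySem.List.pyGet? s cur = some 0) (hnb : (PySem.Dict.mk conn).get? cur = some nb)
    (hleaf : nb.length = 1 ∧ cur ≠ 0) (hd : PySem.List.pyGet? data cur = some d) :
    dfsBrun conn data (g+1) (Sum.inl (cur, par)) fr s = dfsBrun conn data g (Sum.inr d) fr (PySem.List.pySetD s cur d) := by
  simp [dfsBrun, hget, hnb, hleaf, hd]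
theorem step_nochild (conn : List (Int × List Int)) (data : List Int) (g : Nat) (cur par : Int)
    (nb : List Int) (d : Int) (fr : List (Int × List Int × Int)) (s : List Int)
    (hget : PySem.List.pyGet? s cur = some 0) (hnb : (PySem.Dict.mk conn).get? cur = some nb)
    (hnl : ¬ (nb.length = 1 ∧ cur ≠ 0)) (hfil : nb.filter (fun x => x != par) = [])
    (hd : PySem.List.pyGet? data cur = some d) :
    dfsBrun conn data (g+1) (Sum.inl (cur, par)) fr s = dfsBrun conn data g (Sum.inr d) fr (PySem.List.pySetD s cur d) := by
  simp [dfsBrun, hget, hnb, hnl, hfil, hd]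
theorem step_child (conn : List (Int × List Int)) (data : List Int) (g : Nat) (cur par : Int)
    (nb : List Int) (c : Int) (cs : List Int) (fr : List (Int × List Int × Int)) (s : List Int)
    (hget : PySem.List.pyGet? s cur = some 0) (hnb : (PySem.Dict.mk conn).get? cur = some nb)
    (hnl : ¬ (nb.length = 1 ∧ cur ≠ 0)) (hfil : nb.filter (fun x => x != par) = c :: cs) :
    dfsBrun conn data (g+1) (Sum.inl (cur, par)) fr s = dfsBrun conn data g (Sum.inl (c, cur)) ((cur, cs, 0) :: fr) s := by
  simp [dfsBrun, hget, hnb, hnl, hfil]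
theorem step_retnil (conn : List (Int × List Int)) (data : List Int) (g : Nat) (r : Int) (s : List Int) :
    dfsBrun conn data g (Sum.inr r) [] s = some r := by
  cases g <;> simp [dfsBrun]
theorem step_popfinal (conn : List (Int × List Int)) (data : List Int) (g : Nat) (r c acc d : Int)
    (fr : List (Int × List Int × Int)) (s : List Int) (hd : PySem.List.pyGet? data c = some d) :
    dfsBrun conn data g (Sum.inr r) ((c, [], acc) :: fr) s
      = dfsBrun conn data g (Sum.inr (acc + r + d)) fr (PySem.List.pySetD s c (acc + r + d)) := by
  cases g <;> simp [dfsBrun, hd]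
theorem step_popnext (conn : List (Int × List Int)) (data : List Int) (g : Nat) (r c acc c2 : Int)
    (cs : List Int) (fr : List (Int × List Int × Int)) (s : List Int) :
    dfsBrun conn data (g+1) (Sum.inr r) ((c, c2 :: cs, acc) :: fr) s
      = dfsBrun conn data g (Sum.inl (c2, c)) ((c, cs, acc + r) :: fr) s := by
  simp [dfsBrun]
theorem runMono (conn : List (Int × List Int)) (data : List Int)
    (f : Nat) (st : (Int × Int) ⊕ Int) (fr : List (Int × List Int × Int)) (s : List Int) :
    ∀ (out : Int) (f' : Nat), dfsBrun conn data f st fr s = some out → f ≤ f' → dfsBrun conn data f' st fr s = some out := by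
  fun_induction dfsBrun conn data f st fr s
  case case1 => intro out f' h _; exact absurd h (by simp)
  case case2 => intro out f' h _; exact absurd h (by simp)
  case case3 =>
    rename_i g cur par fr' s' sv hget hsv ih
    intro out f' h hle
    obtain ⟨g', rfl⟩ : ∃ g', f' = g' + 1 := ⟨f' - 1, by omega⟩
    rw [step_memo conn data g' cur par sv fr' s' hget hsv]
    exact ih out g' h (by omega)
  case case4 => intro out f' h _; exact absurd h (by simp)
  case case5 => intro out f' h _; exact absurd h (by simp)
  case case6 =>
    rename_i g cur par fr' s' sv hget hsv nb hnb hleaf d hd ih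
    intro out f' h hle
    obtain ⟨g', rfl⟩ : ∃ g', f' = g' + 1 := ⟨f' - 1, by omega⟩
    rw [step_leaf conn data g' cur par nb d fr' s' (by rwa [not_not.mp hsv] at hget) hnb hleaf hd]
    exact ih out g' h (by omega)
  case case7 => intro out f' h _; exact absurd h (by simp)
  case case8 =>
    rename_i g cur par fr' s' sv hget hsv nb hnb hnl hfil d hd ih
    intro out f' h hle
    obtain ⟨g', rfl⟩ : ∃ g', f' = g' + 1 := ⟨f' - 1, by omega⟩
    rw [step_nochild conn data g' cur par nb d fr' s' (by rwa [not_not.mp hsv] at hget) hnb hnl hfil hd]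
    exact ih out g' h (by omega)
  case case9 =>
    rename_i g cur par fr' s' sv hget hsv nb hnb hnl c cs hfil ih
    intro out f' h hle
    obtain ⟨g', rfl⟩ : ∃ g', f' = g' + 1 := ⟨f' - 1, by omega⟩
    rw [step_child conn data g' cur par nb c cs fr' s' (by rwa [not_not.mp hsv] at hget) hnb hnl hfil]
    exact ih out g' h (by omega)
  case case10 =>
    rename_i g r s'
    intro out f' h _
    rw [step_retnil]; exact h ▸ rfl
  case case11 => intro out f' h _; exact absurd h (by simp)
  case case12 =>
    rename_i g r c acc fr' s' d hd ih
    intro out f' h hle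
    rw [step_popfinal conn data f' r c acc d fr' s' hd]
    exact ih out f' h hle
  case case13 => intro out f' h _; exact absurd h (by simp)
  case case14 =>
    rename_i r c acc fr' s' c2 cs g ih
    intro out f' h hle
    obtain ⟨g', rfl⟩ : ∃ g', f' = g' + 1 := ⟨f' - 1, by omega⟩
    rw [step_popnext]
    exact ih out g' h (by omega)
theorem foldAllPar (conn : List (Int × List Int)) (data : List Int) (f : Nat) (cur par : Int)
    (l : List Int) (a : Int) (s : List Int) (hall : ∀ v ∈ l, v = par) :
    dfsAOFold conn data f cur par l a s = some (a, s) := by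
  induction l with
  | nil => simp [dfsAOFold]
  | cons x t ih =>
    have hx : x = par := hall x (by simp)
    simp only [dfsAOFold, hx, ne_eq, not_true_eq_false, if_false]
    exact ih (fun v hv => hall v (by simp [hv]))
theorem foldFilter (conn : List (Int × List Int)) (data : List Int) (f : Nat) (cur par : Int)
    (l : List Int) : ∀ (a : Int) (s : List Int),
    dfsAOFold conn data f cur par l a s = dfsAOFold conn data f cur par (l.filter (fun x => x != par)) a s := by
  induction l with
  | nil => intro a s; rfl
  | cons x t ih =>
    intro a s
    by_cases hx : x = par
    · have hf : (x :: t).filter (fun y => y != par) = t.filter (fun y => y != par) := by simp [hx]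
      rw [hf]
      simp only [dfsAOFold, ne_eq, hx, not_true_eq_false, if_false]
      exact ih a s
    · have hf : (x :: t).filter (fun y => y != par) = x :: t.filter (fun y => y != par) := by simp [hx]
      rw [hf]
      simp only [dfsAOFold, ne_eq, hx, not_false_eq_true, if_true]
      cases dfsAO conn data f x s cur with
      | none => rfl
      | some p => exact ih _ _
theorem nbLenLe (conn : List (Int × List Int)) (cur : Int) (nb : List Int)
    (h : (PySem.Dict.mk conn).get? cur = some nb) : nb.length ≤ sizeConn conn := by
  induction conn with
  | nil => simp [PySem.Dict.get?] at h
  | cons e rest ih =>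
    rw [PySem.Dict.get?_mk_cons] at h
    by_cases he : e.1 == cur
    · simp [he] at h
      simp [sizeConn, ← h]
    · simp [he] at h
      have := ih h
      simp [sizeConn] at this ⊢
      omega
theorem getSome (s : List Int) (i : Int) (h0 : 0 ≤ i) (h1 : i < (s.length:Int)) : ∃ v, PySem.List.pyGet? s i = some v := by
  simp only [PySem.List.pyGet?, PySem.List.pyIdx?]
  have h2 : i.toNat < s.length := by omega
  split_ifs
  · simp [List.getElem?_eq_getElem h2]
theorem foldSimAux (conn : List (Int × List Int)) (data : List Int) (f : Nat) (cur par d : Int)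
    (hd : PySem.List.pyGet? data cur = some d)
    (IH : ∀ (cur' par' : Int) (sums : List Int) (r' : Int) (s'' : List Int),
      dfsAO conn data f cur' sums par' = some (r', s'') →
      ∀ (fr : List (Int × List Int × Int)) (g : Nat) (out : Int),
        dfsBrun conn data g (Sum.inr r') fr s'' = some out →
        dfsBrun conn data (g + (sizeConn conn + 2) ^ (f + 1)) (Sum.inl (cur', par')) fr sums = some out) :
    ∀ (cs : List Int) (c a : Int) (s : List Int) (a'' : Int) (s'' : List Int),
      dfsAOFold conn data f cur par (c :: cs) a s = some (a'', s'') →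
      (∀ v ∈ (c :: cs), v ≠ par) →
      ∀ (fr : List (Int × List Int × Int)) (g : Nat) (out : Int),
        dfsBrun conn data g (Sum.inr (a'' + d)) fr (PySem.List.pySetD s'' cur (a'' + d)) = some out →
        dfsBrun conn data (g + (cs.length + 1) * ((sizeConn conn + 2) ^ (f + 1) + 1))
          (Sum.inl (c, cur)) ((cur, cs, a) :: fr) s = some out := by
  intro cs
  induction cs with
  | nil =>
    intro c a s a'' s'' hF hnp fr g out hrun
    have hc : c ≠ par := hnp c (by simp)
    rw [dfsAOFold, if_pos hc] at hF
    split at hF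
    case h_1 => exact absurd hF (by simp)
    case h_2 rc sc hAc =>
      obtain ⟨h1, h2⟩ : a + rc = a'' ∧ sc = s'' := by
        simp only [dfsAOFold] at hF; simpa using hF
      subst h1; subst h2
      have h2 : dfsBrun conn data g (Sum.inr rc) ((cur, [], a) :: fr) sc = some out := by
        rw [step_popfinal conn data g rc cur a d fr sc hd]; exact hrun
      have h3 := IH c cur s rc sc hAc ((cur, [], a) :: fr) g out h2
      exact runMono conn data _ _ _ _ out _ h3 (by simp only [List.length_nil, Nat.zero_add, Nat.one_mul]; omega)
  | cons c2 t ih =>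
    intro c a s a'' s'' hF hnp fr g out hrun
    have hc : c ≠ par := hnp c (by simp)
    rw [dfsAOFold, if_pos hc] at hF
    split at hF
    case h_1 => exact absurd hF (by simp)
    case h_2 rc sc hAc =>
      have h1 := ih c2 (a + rc) sc a'' s'' hF (fun v hv => hnp v (by simp at hv ⊢; tauto)) fr g out hrun
      have h2 : dfsBrun conn data (g + (t.length + 1) * ((sizeConn conn + 2) ^ (f + 1) + 1) + 1)
          (Sum.inr rc) ((cur, c2 :: t, a) :: fr) sc = some out := by
        rw [step_popnext]; exact h1
      have h3 := IH c cur s rc sc hAc ((cur, c2 :: t, a) :: fr) _ out h2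
      refine runMono conn data _ _ _ _ out _ h3 (le_of_eq (by simp only [List.length_cons]; ring))
theorem simAB (conn : List (Int × List Int)) (data : List Int) :
    ∀ (f : Nat) (cur par : Int) (sums : List Int) (r : Int) (s' : List Int),
      dfsAO conn data f cur sums par = some (r, s') →
      ∀ (fr : List (Int × List Int × Int)) (g : Nat) (out : Int),
        dfsBrun conn data g (Sum.inr r) fr s' = some out →
        dfsBrun conn data (g + (sizeConn conn + 2) ^ (f + 1)) (Sum.inl (cur, par)) fr sums = some out := by
  intro f
  induction f with
  | zero => intro cur par sums r s' hA; exact absurd hA (by simp [dfsAO])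
  | succ f IH =>
    intro cur par sums r s' hA fr g out hrun
    have hpow1 : 1 ≤ (sizeConn conn + 2) ^ (f + 1 + 1) := Nat.one_le_pow _ _ (by omega)
    obtain ⟨G, hG⟩ : ∃ G, g + (sizeConn conn + 2) ^ (f + 1 + 1) = G + 1 := ⟨g + (sizeConn conn + 2) ^ (f + 1 + 1) - 1, by omega⟩
    rw [hG]
    rw [dfsAO] at hA
    split at hA
    case h_1 => exact absurd hA (by simp)
    case h_2 sv hget =>
      split_ifs at hA with hsv
      · -- memo hit
        obtain ⟨h1, h2⟩ : sv = r ∧ sums = s' := by simpa using hA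
        subst h1; subst h2
        rw [step_memo conn data G cur par sv fr sums hget hsv]
        exact runMono conn data _ _ _ _ out _ hrun (by omega)
      · have hsv0 : sv = 0 := not_not.mp hsv
        subst hsv0
        split at hA
        case h_1 => exact absurd hA (by simp)
        case h_2 nb hnb =>
          split_ifs at hA with hleaf
          · -- leaf
            split at hA
            case h_1 => exact absurd hA (by simp)
            case h_2 d hd =>
              obtain ⟨h1, h2⟩ : d = r ∧ PySem.List.pySetD sums cur d = s' := by simpa using hA
              subst h1; subst h2
              rw [step_leaf conn data G cur par nb d fr sums hget hnb hleaf hd]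
              exact runMono conn data _ _ _ _ out _ hrun (by omega)
          · -- children fold
            split at hA
            case h_1 => exact absurd hA (by simp)
            case h_2 a s2 hF =>
              split at hA
              case h_1 => exact absurd hA (by simp)
              case h_2 d hd =>
                obtain ⟨h1, h2⟩ : a + d = r ∧ PySem.List.pySetD s2 cur (a + d) = s' := by
                  simpa using hA
                subst h1; subst h2
                cases hfil : nb.filter (fun x => x != par) with
                | nil =>
                  have hall : ∀ v ∈ nb, v = par := by
                    intro v hv
                    by_contra hne
                    have hm : v ∈ nb.filter (fun x => x != par) :=
                      List.mem_filter.mpr ⟨hv, by simpa using hne⟩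
                    simp [hfil] at hm
                  have h0 := foldAllPar conn data f cur par nb 0 sums hall
                  rw [h0] at hF
                  obtain ⟨ha, hs⟩ : (0 : Int) = a ∧ sums = s2 := by simpa using hF
                  subst ha; subst hs
                  rw [step_nochild conn data G cur par nb d fr sums hget hnb hleaf hfil hd]
                  simp only [zero_add] at hrun ⊢
                  exact runMono conn data _ _ _ _ out _ hrun (by omega)
                | cons c cs =>
                  rw [foldFilter conn data f cur par nb, hfil] at hF
                  have hnp : ∀ v ∈ (c :: cs), v ≠ par := by
                    intro v hv
                    have : v ∈ nb.filter (fun x => x != par) := by rw [hfil]; exact hv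
                    simpa using (List.mem_filter.mp this).2
                  have hmain := foldSimAux conn data f cur par d hd IH cs c 0 sums a s2 hF hnp fr g out hrun
                  rw [step_child conn data G cur par nb c cs fr sums hget hnb hleaf hfil]
                  refine runMono conn data _ _ _ _ out _ hmain ?_
                  have hk : (c :: cs).length ≤ sizeConn conn := by
                    calc (c :: cs).length = (nb.filter (fun x => x != par)).length := by rw [hfil]
                    _ ≤ nb.length := List.length_filter_le _ _
                    _ ≤ sizeConn conn := nbLenLe conn cur nb hnb
                  have hP : sizeConn conn + 2 ≤ (sizeConn conn + 2) ^ (f + 1) := by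
                    calc sizeConn conn + 2 = (sizeConn conn + 2) ^ 1 := (pow_one _).symm
                    _ ≤ (sizeConn conn + 2) ^ (f + 1) := Nat.pow_le_pow_right (by omega) (by omega)
                  have hkk : cs.length + 1 ≤ sizeConn conn := by simpa using hk
                  have e1 : (cs.length + 1) * ((sizeConn conn + 2) ^ (f + 1)) ≤ sizeConn conn * ((sizeConn conn + 2) ^ (f + 1)) :=
                    Nat.mul_le_mul_right _ hkk
                  have e2 : (sizeConn conn + 2) ^ (f + 1 + 1) = (sizeConn conn + 2) * (sizeConn conn + 2) ^ (f + 1) := by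
                    ring
                  nlinarith [e1, hP, hG]
theorem foldTerm (conn : List (Int × List Int)) (data : List Int) (n : Nat)
    (fu : Nat) (cur par : Int) :
    ∀ (l : List Int) (a : Int) (s : List Int), s.length = n →
      (∀ v ∈ l, v ≠ par → ∀ t : List Int, t.length = n →
        ∃ r t', dfsAO conn data fu v t cur = some (r, t') ∧ t'.length = n) →
      ∃ a' s'', dfsAOFold conn data fu cur par l a s = some (a', s'') ∧ s''.length = n := by
  intro l
  induction l with
  | nil => intro a s hs _; exact ⟨a, s, by simp [dfsAOFold], hs⟩
  | cons v t ih =>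
    intro a s hs hch
    by_cases hv : v = par
    · rw [dfsAOFold, if_neg (by simp [hv])]
      exact ih a s hs (fun w hw => hch w (by simp [hw]))
    · obtain ⟨r, t', hA, ht'⟩ := hch v (by simp) hv s hs
      rw [dfsAOFold, if_pos hv, hA]
      exact ih (a + r) t' ht' (fun w hw => hch w (by simp [hw]))
theorem termA (conn : List (Int × List Int)) (data : List Int) (n : Nat)
    (hdata : data.length = n)
    (hconn : ∀ u : Nat, u < n → ∃ nb, (PySem.Dict.mk conn).get? (u : Int) = some nb ∧
      ∀ v ∈ nb, 0 ≤ v ∧ v < (n : Int)) :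
    ∀ (k : Nat) (cur par : Int) (s : List Int), 0 ≤ cur → cur < (n : Int) → s.length = n →
      bw conn k par cur = true →
      ∃ r s', dfsAO conn data (k + 1) cur s par = some (r, s') ∧ s'.length = n := by
  intro k
  induction k with
  | zero =>
    intro cur par s hc0 hc1 hs hbw
    obtain ⟨nb, hnb, hnbr⟩ := hconn cur.toNat (by omega)
    rw [Int.toNat_of_nonneg hc0] at hnb
    obtain ⟨sv, hget⟩ := getSome s cur hc0 (by omega)
    obtain ⟨d, hd⟩ := getSome data cur hc0 (by omega)
    by_cases hsv : sv ≠ 0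
    · exact ⟨sv, s, by simp only [dfsAO, hget, if_pos hsv], hs⟩
    · simp only [bw, hnb, Option.getD_some, List.all_eq_true, beq_iff_eq] at hbw
      by_cases hleaf : nb.length = 1 ∧ cur ≠ 0
      · exact ⟨d, PySem.List.pySetD s cur d, by simp only [dfsAO, hget, if_neg hsv, hnb, if_pos hleaf, hd],
          by rw [PySem.List.length_pySetD]; exact hs⟩
      · obtain ⟨a', s'', hF, hs''⟩ := foldTerm conn data n 0 cur par nb 0 s hs
          (fun v hv hvp => absurd (hbw v hv) hvp)
        exact ⟨a' + d, PySem.List.pySetD s'' cur (a' + d), by simp only [dfsAO, hget, if_neg hsv, hnb, if_neg hleaf, hF, hd],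
          by rw [PySem.List.length_pySetD]; exact hs''⟩
  | succ k IH =>
    intro cur par s hc0 hc1 hs hbw
    obtain ⟨nb, hnb, hnbr⟩ := hconn cur.toNat (by omega)
    rw [Int.toNat_of_nonneg hc0] at hnb
    obtain ⟨sv, hget⟩ := getSome s cur hc0 (by omega)
    obtain ⟨d, hd⟩ := getSome data cur hc0 (by omega)
    by_cases hsv : sv ≠ 0
    · exact ⟨sv, s, by simp only [dfsAO, hget, if_pos hsv], hs⟩
    · simp only [bw, hnb, Option.getD_some, List.all_eq_true, Bool.or_eq_true, beq_iff_eq] at hbw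
      by_cases hleaf : nb.length = 1 ∧ cur ≠ 0
      · exact ⟨d, PySem.List.pySetD s cur d, by simp only [dfsAO, hget, if_neg hsv, hnb, if_pos hleaf, hd],
          by rw [PySem.List.length_pySetD]; exact hs⟩
      · obtain ⟨a', s'', hF, hs''⟩ := foldTerm conn data n (k + 1) cur par nb 0 s hs
          (by
            intro v hv hvp t ht
            rcases hbw v hv with h | h
            · exact absurd h hvp
            · obtain ⟨hv0, hv1⟩ := hnbr v hv
              exact IH v cur t hv0 hv1 ht h)
        exact ⟨a' + d, PySem.List.pySetD s'' cur (a' + d), by simp only [dfsAO, hget, if_neg hsv, hnb, if_neg hleaf, hF, hd],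
          by rw [PySem.List.length_pySetD]; exact hs''⟩

theorem master (conn : List (Int × List Int)) (node : Int) (sums : List Int) (data : List Int) (parent : Int)
    (hpre : preB_dfs conn node sums data parent = true) :
    dfs conn node sums data parent = dfs_alt conn node sums data parent := by
  cases hget : PySem.List.pyGet? sums node with
  | none => simp only [preB_dfs, hget] at hpre; exact absurd hpre (by simp)
  | some sv =>
    simp only [preB_dfs, hget] at hpre
    by_cases hsv : sv = 0
    case neg =>
      have hA : dfsAO conn data (sums.length + 1) node sums parent = some (sv, sums) := by
        simp only [dfsAO, hget, if_pos (show sv ≠ 0 from hsv)]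
      simp only [dfs, hA, dfs_alt, hget, Option.getD_some, ne_eq, hsv, not_false_eq_true, if_true]
    case pos =>
      subst hsv
      simp only [bne_self_eq_false, Bool.false_eq_true, if_false, Bool.or_eq_true] at hpre
      obtain ⟨G, hG⟩ : ∃ G, (sizeConn conn + 2) ^ (sums.length + 2) = G + 1 :=
        ⟨(sizeConn conn + 2) ^ (sums.length + 2) - 1, by
          have := Nat.one_le_pow (sums.length + 2) (sizeConn conn + 2) (by omega); omega⟩
      rcases hpre with htriv | hstruct
      · -- no-recursion disjuncts: leaf or all neighbors equal to parent
        cases hnb : (PySem.Dict.mk conn).get? node with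
        | none => simp only [hnb] at htriv; exact absurd htriv (by simp)
        | some nb =>
          cases hd : PySem.List.pyGet? data node with
          | none => simp only [hnb, hd] at htriv; exact absurd htriv (by simp)
          | some d =>
            simp only [hnb, hd] at htriv
            by_cases hleaf : nb.length = 1 ∧ node ≠ 0
            · have hA : dfsAO conn data (sums.length + 1) node sums parent
                  = some (d, PySem.List.pySetD sums node d) := by
                simp only [dfsAO, hget, ne_eq, not_true_eq_false, if_false, hnb, if_pos hleaf, hd]
              have hB : dfsBrun conn data ((sizeConn conn + 2) ^ (sums.length + 2))
                  (Sum.inl (node, parent)) [] sums = some d := by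
                rw [hG, step_leaf conn data G node parent nb d [] sums hget hnb hleaf hd,
                  step_retnil]
              simp only [dfs, hA, dfs_alt, hget, Option.getD_some, ne_eq, not_true_eq_false,
                if_false, hB]
            · have hall : ∀ v ∈ nb, v = parent := by
                have : (nb.length == 1 && node != 0) = false := by
                  simp only [Bool.and_eq_false_iff]
                  by_cases h1 : nb.length = 1
                  · right; simp; by_contra h2; exact hleaf ⟨h1, by simpa using h2⟩
                  · left; simpa using h1
                rw [this] at htriv
                simp only [Bool.false_or, List.all_eq_true, beq_iff_eq] at htriv
                exact htriv
              have hfil : nb.filter (fun x => x != parent) = [] := by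
                rw [List.filter_eq_nil_iff]
                intro v hv; simpa using hall v hv
              have hF := foldAllPar conn data sums.length node parent nb 0 sums hall
              have hA : dfsAO conn data (sums.length + 1) node sums parent
                  = some (0 + d, PySem.List.pySetD sums node (0 + d)) := by
                simp only [dfsAO, hget, ne_eq, not_true_eq_false, if_false, hnb, if_neg hleaf,
                  hF, hd]
              have hB : dfsBrun conn data ((sizeConn conn + 2) ^ (sums.length + 2))
                  (Sum.inl (node, parent)) [] sums = some d := by
                rw [hG, step_nochild conn data G node parent nb d [] sums hget hnb hleaf hfil hd,
                  step_retnil]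
              simp only [dfs, hA, dfs_alt, hget, Option.getD_some, ne_eq, not_true_eq_false,
                if_false, hB, zero_add]
      · -- well-formed rooted case: A terminates within fuel, B simulates A
        simp only [structOK, Bool.and_eq_true, decide_eq_true_eq, beq_iff_eq,
          List.all_eq_true] at hstruct
        obtain ⟨⟨⟨⟨hn0, hn1⟩, hdlen⟩, hconnall⟩, hbw⟩ := hstruct
        have hconn : ∀ u : Nat, u < sums.length → ∃ nb, (PySem.Dict.mk conn).get? (u : Int) = some nb ∧
            ∀ v ∈ nb, 0 ≤ v ∧ v < (sums.length : Int) := by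
          intro u hu
          have h1 := hconnall u (List.mem_range.mpr hu)
          cases hnb : (PySem.Dict.mk conn).get? (u : Int) with
          | none => simp only [hnb] at h1; exact absurd h1 (by simp)
          | some nb =>
            simp only [hnb, List.all_eq_true, Bool.and_eq_true, decide_eq_true_eq] at h1
            exact ⟨nb, rfl, h1⟩
        obtain ⟨r, s', hA, _⟩ := termA conn data sums.length hdlen hconn sums.length node parent
          sums hn0 hn1 rfl hbw
        have hrun0 : dfsBrun conn data 0 (Sum.inr r) [] s' = some r := step_retnil conn data 0 r s'
        have hB := simAB conn data (sums.length + 1) node parent sums r s' hA [] 0 r hrun0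
        rw [Nat.zero_add] at hB
        simp only [dfs, hA, dfs_alt, hget, Option.getD_some, ne_eq, not_true_eq_false, if_false]
        rw [show sums.length + 1 + 1 = sums.length + 2 from rfl] at hB
        rw [hB]
        rfl

-- ===== VERDICT =====
theorem dfs_spec : Claim_equal_dfs := by
  intro conn node sums data parent _ hpre
  unfold Spec_dfs
  exact master conn node sums data parent hpre
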